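-- pv_equiv track=rewrite | github.com/gabalvarezmc/t2_dppd | src/sudoku_solver/techniques/xy_wing.py | get_shared_peers
-- ===== SOURCE A (Python) =====
-- def shares_unit(cell1, cell2):
--     r1, c1 = cell1
--     r2, c2 = cell2
--     same_row = r1 == r2
--     same_col = c1 == c2
--     same_box = (r1 // 3 == r2 // 3) and (c1 // 3 == c2 // 3)
--     return same_row or same_col or same_box
--
-- def get_shared_peers(cell1, cell2):
--     r1, c1 = cell1
--     r2, c2 = cell2
--     shared = []
--     for r in range(9):
--         for c in range(9):
--             if (r, c) != cell1 and (r, c) != cell2: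
--                 if shares_unit((r, c), cell1) and shares_unit((r, c), cell2):
--                     shared.append((r, c))
--     return shared
-- ===== SOURCE B (Python) =====
-- def _peers(cell):
--     r0, c0 = cell
--     return {(r, c) for r in range(9) for c in range(9)
--             if (r, c) != cell
--             and (r == r0 or c == c0
--                  or (r // 3 == r0 // 3 and c // 3 == c0 // 3))}
--
--
-- def get_shared_peers(cell1, cell2):
--     return sorted(_peers(cell1) & _peers(cell2))
-- ===== Notes on version B (the rewrite author's own statement) =====
-- stated objective: simpler
-- what changed: Replaces the single 81-cell scan with an explicit conjunction of four guards by a peer-set helper: the result is the sorted intersection of the two cells' peer sets, which excludes the given cells automatically.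
import Mathlib
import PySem

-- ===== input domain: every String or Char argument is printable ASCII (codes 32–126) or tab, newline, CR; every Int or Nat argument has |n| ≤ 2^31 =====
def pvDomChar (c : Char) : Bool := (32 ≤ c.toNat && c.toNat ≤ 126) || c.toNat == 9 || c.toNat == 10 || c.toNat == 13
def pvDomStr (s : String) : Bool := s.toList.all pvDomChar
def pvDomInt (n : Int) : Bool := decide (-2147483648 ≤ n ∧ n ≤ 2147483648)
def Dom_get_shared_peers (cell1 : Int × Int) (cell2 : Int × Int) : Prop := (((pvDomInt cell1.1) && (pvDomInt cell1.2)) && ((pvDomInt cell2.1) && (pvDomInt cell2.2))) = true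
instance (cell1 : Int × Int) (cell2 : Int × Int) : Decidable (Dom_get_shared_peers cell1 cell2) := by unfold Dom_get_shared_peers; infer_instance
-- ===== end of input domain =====

-- B replaces A's single 81-cell scan with a peer-set helper: sorted(peers(cell1) & peers(cell2)); same cost, simpler decomposition.


-- ===== PORT A =====
def shares_unit (cell1 : Int × Int) (cell2 : Int × Int) : Bool :=
  let r1 := cell1.1; let c1 := cell1.2
  let r2 := cell2.1; let c2 := cell2.2
  let same_row := r1 == r2
  let same_col := c1 == c2
  let same_box := (PySem.Int.floordiv r1 3 == PySem.Int.floordiv r2 3) &&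
                  (PySem.Int.floordiv c1 3 == PySem.Int.floordiv c2 3)
  same_row || same_col || same_box

def get_shared_peers (cell1 : Int × Int) (cell2 : Int × Int) : List (Int × Int) :=
  (PySem.List.pyRange 0 9 1).foldl (fun shared r =>
    (PySem.List.pyRange 0 9 1).foldl (fun shared c =>
      if ((r, c) ≠ cell1 ∧ (r, c) ≠ cell2) then
        (if shares_unit (r, c) cell1 && shares_unit (r, c) cell2 then shared ++ [(r, c)]
         else shared)
      else shared) shared) []

-- ===== PORT B =====
-- the comprehension's test for one candidate pair p against cell
def pvSees (cell : Int × Int) (p : Int × Int) : Bool :=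
  decide (p ≠ cell) &&
    (p.1 == cell.1 || p.2 == cell.2 ||
      (PySem.Int.floordiv p.1 3 == PySem.Int.floordiv cell.1 3 &&
       PySem.Int.floordiv p.2 3 == PySem.Int.floordiv cell.2 3))

def pvPeers (cell : Int × Int) : PySem.Set (Int × Int) :=
  PySem.Set.ofList ((PySem.List.pyRange 0 9 1).flatMap (fun r =>
    ((PySem.List.pyRange 0 9 1).filter (fun c => pvSees cell (r, c))).map (fun c => (r, c))))

def get_shared_peers_alt (cell1 : Int × Int) (cell2 : Int × Int) : List (Int × Int) :=
  PySem.List.sorted2 (PySem.Set.inter (pvPeers cell1) (pvPeers cell2))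
    (fun p => p.1) (fun p => p.2) false

-- ===== PRECONDITION & SPEC =====
def Spec_get_shared_peers (cell1 : Int × Int) (cell2 : Int × Int) (out : List (Int × Int)) : Prop := out = get_shared_peers_alt cell1 cell2
instance (cell1 : Int × Int) (cell2 : Int × Int) (out : List (Int × Int)) : Decidable (Spec_get_shared_peers cell1 cell2 out) := by unfold Spec_get_shared_peers; infer_instance

-- ===== CLAIM (what is proved, stated in full; the proofs are below) =====
def Claim_equal_get_shared_peers : Prop := ∀ (cell1 : Int × Int) (cell2 : Int × Int), Dom_get_shared_peers cell1 cell2 → Spec_get_shared_peers cell1 cell2 (get_shared_peers cell1 cell2)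

-- ===== LEMMAS AND PROOFS =====

-- the 81 grid cells in row-major order
def pvGrid : List (Int × Int) :=
  (PySem.List.pyRange 0 9 1).flatMap (fun r => (PySem.List.pyRange 0 9 1).map (fun c => (r, c)))

-- A's combined test, as one Bool
def pvCondA (cell1 cell2 p : Int × Int) : Bool :=
  (decide (p ≠ cell1) && decide (p ≠ cell2)) && (shares_unit p cell1 && shares_unit p cell2)

theorem A_as_filter (cell1 cell2 : Int × Int) :
    get_shared_peers cell1 cell2 = pvGrid.filter (pvCondA cell1 cell2) := by
  unfold get_shared_peers
  have hinner : ∀ (r : Int) (s : List (Int × Int)),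
      (PySem.List.pyRange 0 9 1).foldl (fun shared c =>
        if ((r, c) ≠ cell1 ∧ (r, c) ≠ cell2) then
          (if shares_unit (r, c) cell1 && shares_unit (r, c) cell2 then shared ++ [(r, c)]
           else shared)
        else shared) s
      = s ++ ((PySem.List.pyRange 0 9 1).filter (fun c => pvCondA cell1 cell2 (r, c))).map
              (fun c => ((r : Int), (c : Int))) := by
    intro r s
    rw [← PySem.List.foldl_append_if (p := fun c => pvCondA cell1 cell2 (r, c))
        (f := fun c => ((r : Int), (c : Int)))]
    apply PySem.List.foldl_congr_mem
    intro acc c _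
    by_cases h1 : ((r, c) ≠ cell1 ∧ (r, c) ≠ cell2) <;>
      by_cases h2 : (shares_unit (r, c) cell1 && shares_unit (r, c) cell2) = true <;>
      simp [pvCondA, h1, h2]
  calc (PySem.List.pyRange 0 9 1).foldl (fun shared r =>
        (PySem.List.pyRange 0 9 1).foldl (fun shared c =>
          if ((r, c) ≠ cell1 ∧ (r, c) ≠ cell2) then
            (if shares_unit (r, c) cell1 && shares_unit (r, c) cell2 then shared ++ [(r, c)]
             else shared)
          else shared) shared) []
      = (PySem.List.pyRange 0 9 1).foldl (fun shared r =>
          shared ++ ((PySem.List.pyRange 0 9 1).filter (fun c => pvCondA cell1 cell2 (r, c))).map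
            (fun c => ((r : Int), (c : Int)))) [] := by
        apply PySem.List.foldl_congr_mem; intro acc r _; exact hinner r acc
    _ = [] ++ (PySem.List.pyRange 0 9 1).flatMap (fun r =>
          ((PySem.List.pyRange 0 9 1).filter (fun c => pvCondA cell1 cell2 (r, c))).map
            (fun c => ((r : Int), (c : Int)))) := by
        rw [PySem.List.foldl_append_eq_flatMap]
    _ = pvGrid.filter (pvCondA cell1 cell2) := by
        simp only [List.nil_append, pvGrid, List.filter_flatMap]
        apply List.flatMap_congr  -- may need renaming
        intro r _
        rw [List.filter_map]
        rfl

theorem peers_as_filter (cell : Int × Int) :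
    pvPeers cell = pvGrid.filter (pvSees cell) := by
  have h1 : (PySem.List.pyRange 0 9 1).flatMap (fun r =>
      ((PySem.List.pyRange 0 9 1).filter (fun c => pvSees cell (r, c))).map (fun c => ((r : Int), (c : Int))))
      = pvGrid.filter (pvSees cell) := by
    simp only [pvGrid, List.filter_flatMap]
    apply List.flatMap_congr
    intro r _
    rw [List.filter_map]
    rfl
  unfold pvPeers
  rw [h1, PySem.Set.ofList_eq_self_of_nodup]
  exact (List.Nodup.filter _ (by decide : pvGrid.Nodup))

theorem pre_sort_eq (cell1 cell2 : Int × Int) :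
    PySem.Set.inter (pvPeers cell1) (pvPeers cell2) = pvGrid.filter (pvCondA cell1 cell2) := by
  rw [peers_as_filter, peers_as_filter]
  show (pvGrid.filter (pvSees cell1)).filter
      (fun x => (pvGrid.filter (pvSees cell2)).contains x) = _
  rw [List.filter_filter]
  apply List.filter_congr
  intro p hp
  have hc : (pvGrid.filter (pvSees cell2)).contains p = pvSees cell2 p := by
    by_cases h : pvSees cell2 p = true
    · simp [List.mem_filter, hp, h]
    · simp only [Bool.not_eq_true] at h
      simp [List.mem_filter, h]
  rw [hc]
  -- pointwise: sees2 p && sees1 p = A's combined condition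
  rw [Bool.eq_iff_iff]
  simp only [pvCondA, pvSees, shares_unit, Bool.and_eq_true, Bool.or_eq_true,
    decide_eq_true_eq, beq_iff_eq]
  tauto

-- generic insertion-sort facts
theorem insertBy_append_of_all_false {α : Type} (before : α → α → Bool) (x : α) (l : List α)
    (h : ∀ y ∈ l, before x y = false) : PySem.List.insertBy before x l = l ++ [x] := by
  induction l with
  | nil => rfl
  | cons y ys ih =>
    have hy : before x y = false := h y (by simp)
    simp [PySem.List.insertBy, hy, ih (fun z hz => h z (by simp [hz]))]

theorem foldl_insertBy_of_pairwise {α : Type} (before : α → α → Bool)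
    (hasym : ∀ a b, before a b = true → before b a = false) (l : List α)
    (h : l.Pairwise (fun a b => before a b = true)) :
    l.foldl (fun acc x => PySem.List.insertBy before x acc) [] = l := by
  induction l using List.reverseRecOn with
  | nil => rfl
  | append_singleton l x ih =>
    have hp := List.pairwise_append.mp h
    rw [List.foldl_append]
    simp only [List.foldl_cons, List.foldl_nil]
    rw [ih hp.1]
    exact insertBy_append_of_all_false _ _ _
      (fun y hy => hasym _ _ (hp.2.2 y hy x (by simp)))

-- the strict lexicographic comparison used by sorted2 with keys fst, snd
def pvLex (a b : Int × Int) : Bool :=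
  decide (a.1 < b.1) || (!decide (b.1 < a.1) && decide (a.2 < b.2))

theorem pvLex_iff (a b : Int × Int) :
    pvLex a b = true ↔ (a.1 < b.1 ∨ (¬ b.1 < a.1 ∧ a.2 < b.2)) := by
  simp [pvLex]

theorem pvLex_asym : ∀ a b : Int × Int, pvLex a b = true → pvLex b a = false := by
  intro a b h
  rw [pvLex_iff] at h
  cases hba : pvLex b a with
  | false => rfl
  | true => rw [pvLex_iff] at hba; omega

theorem sorted2_eq_self (l : List (Int × Int)) (h : l.Pairwise (fun a b => pvLex a b = true)) :
    PySem.List.sorted2 l (fun p => p.1) (fun p => p.2) false = l := by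
  show l.foldl (fun acc x => PySem.List.insertBy pvLex x acc) [] = l
  exact foldl_insertBy_of_pairwise pvLex pvLex_asym l h

theorem grid_pairwise : pvGrid.Pairwise (fun a b => pvLex a b = true) := by decide

-- ===== VERDICT (by name: the statement is the Claim_ definition above) =====
theorem get_shared_peers_spec : Claim_equal_get_shared_peers := by
  intro cell1 cell2 _
  show get_shared_peers cell1 cell2 = get_shared_peers_alt cell1 cell2
  rw [A_as_filter]
  unfold get_shared_peers_alt
  rw [pre_sort_eq, sorted2_eq_self]
  exact grid_pairwise.sublist List.filter_sublist
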